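-- pv_equiv track=rewrite | github.com/YTvW/AoC2021 | day19/part1.py | rotateScanner
-- ===== SOURCE A (Python) =====
-- def rotateScanner(scanner):
--     rotations = []
--     for i in range(24):
--         rotations.append([])
--     for coord in scanner:
--         #positive x
--         rotations[ 0].append((+coord[0],+coord[1],+coord[2]))
--         rotations[ 1].append((+coord[0],-coord[2],+coord[1]))
--         rotations[ 2].append((+coord[0],-coord[1],-coord[2]))
--         rotations[ 3].append((+coord[0],+coord[2],-coord[1]))
--         #negative x
--         rotations[ 4].append((-coord[0],-coord[1],+coord[2]))
--         rotations[ 5].append((-coord[0],+coord[2],+coord[1]))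
--         rotations[ 6].append((-coord[0],+coord[1],-coord[2]))
--         rotations[ 7].append((-coord[0],-coord[2],-coord[1]))
--         #positive y
--         rotations[ 8].append((+coord[1],+coord[2],+coord[0]))
--         rotations[ 9].append((+coord[1],-coord[0],+coord[2]))
--         rotations[10].append((+coord[1],-coord[2],-coord[0]))
--         rotations[11].append((+coord[1],+coord[0],-coord[2]))
--         #negative y
--         rotations[12].append((-coord[1],-coord[2],+coord[0]))
--         rotations[13].append((-coord[1],+coord[0],+coord[2]))
--         rotations[14].append((-coord[1],+coord[2],-coord[0]))
--         rotations[15].append((-coord[1],-coord[0],-coord[2]))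
--         #positive z
--         rotations[16].append((+coord[2],+coord[0],+coord[1]))
--         rotations[17].append((+coord[2],-coord[1],+coord[0]))
--         rotations[18].append((+coord[2],-coord[0],-coord[1]))
--         rotations[19].append((+coord[2],+coord[1],-coord[0]))
--         #negative z
--         rotations[20].append((-coord[2],-coord[0],+coord[1]))
--         rotations[21].append((-coord[2],+coord[1],+coord[0]))
--         rotations[22].append((-coord[2],+coord[0],-coord[1]))
--         rotations[23].append((-coord[2],-coord[1],-coord[0]))
--     return rotations
-- ===== SOURCE B (Python) =====
-- # B: generate the 24 orientations as orbits: for each facing axis and sign, start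
-- # from the cyclic view of each point and iterate a quarter-turn spin 4 times.
-- def rotateScanner(scanner):
--     out = []
--     for a in range(3):
--         for s in (1, -1):
--             pts = [(s * c[a], s * c[(a + 1) % 3], c[(a + 2) % 3]) for c in scanner]
--             for _ in range(4):
--                 out.append(pts)
--                 pts = [(f, -s * q, s * p) for (f, p, q) in pts]
--     return out
-- ===== Notes on version B (the rewrite author's own statement) =====
-- stated objective: alternative
-- what changed: B drops A's 24 hard-coded sign/permutation append expressions entirely: it generates each group of 4 orientations as the orbit of an iterated quarter-turn spin, looping over the 3 facing axes and 2 signs, so no orientation is written out explicitly.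
import Mathlib
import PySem

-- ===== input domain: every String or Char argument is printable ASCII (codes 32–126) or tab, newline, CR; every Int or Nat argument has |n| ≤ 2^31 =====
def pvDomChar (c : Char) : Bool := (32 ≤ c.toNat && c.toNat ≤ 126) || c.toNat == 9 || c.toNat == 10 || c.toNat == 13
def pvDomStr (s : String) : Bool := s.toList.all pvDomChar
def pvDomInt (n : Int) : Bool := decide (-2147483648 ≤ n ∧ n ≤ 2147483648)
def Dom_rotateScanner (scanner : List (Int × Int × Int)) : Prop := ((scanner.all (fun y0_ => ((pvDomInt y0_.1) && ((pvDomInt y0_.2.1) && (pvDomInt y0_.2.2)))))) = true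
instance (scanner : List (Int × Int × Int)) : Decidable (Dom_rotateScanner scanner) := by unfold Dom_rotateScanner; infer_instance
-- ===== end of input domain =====

-- B generates the 24 orientations as orbits of an iterated quarter-turn spin over
-- facing axis × sign, instead of A's 24 hard-coded append expressions (alternative; same cost).

-- ===== PORT A =====
-- A's loop body: rotations[i].append(...) for each of the 24 lists, ported as List.modify at index i.
def rotateStep (r : List (List (Int × Int × Int))) (c : Int × Int × Int) :
    List (List (Int × Int × Int)) :=
  let r := r.modify 0 (fun l => l ++ [(c.1, c.2.1, c.2.2)])
  let r := r.modify 1 (fun l => l ++ [(c.1, -c.2.2, c.2.1)])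
  let r := r.modify 2 (fun l => l ++ [(c.1, -c.2.1, -c.2.2)])
  let r := r.modify 3 (fun l => l ++ [(c.1, c.2.2, -c.2.1)])
  let r := r.modify 4 (fun l => l ++ [(-c.1, -c.2.1, c.2.2)])
  let r := r.modify 5 (fun l => l ++ [(-c.1, c.2.2, c.2.1)])
  let r := r.modify 6 (fun l => l ++ [(-c.1, c.2.1, -c.2.2)])
  let r := r.modify 7 (fun l => l ++ [(-c.1, -c.2.2, -c.2.1)])
  let r := r.modify 8 (fun l => l ++ [(c.2.1, c.2.2, c.1)])
  let r := r.modify 9 (fun l => l ++ [(c.2.1, -c.1, c.2.2)])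
  let r := r.modify 10 (fun l => l ++ [(c.2.1, -c.2.2, -c.1)])
  let r := r.modify 11 (fun l => l ++ [(c.2.1, c.1, -c.2.2)])
  let r := r.modify 12 (fun l => l ++ [(-c.2.1, -c.2.2, c.1)])
  let r := r.modify 13 (fun l => l ++ [(-c.2.1, c.1, c.2.2)])
  let r := r.modify 14 (fun l => l ++ [(-c.2.1, c.2.2, -c.1)])
  let r := r.modify 15 (fun l => l ++ [(-c.2.1, -c.1, -c.2.2)])
  let r := r.modify 16 (fun l => l ++ [(c.2.2, c.1, c.2.1)])
  let r := r.modify 17 (fun l => l ++ [(c.2.2, -c.2.1, c.1)])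
  let r := r.modify 18 (fun l => l ++ [(c.2.2, -c.1, -c.2.1)])
  let r := r.modify 19 (fun l => l ++ [(c.2.2, c.2.1, -c.1)])
  let r := r.modify 20 (fun l => l ++ [(-c.2.2, -c.1, c.2.1)])
  let r := r.modify 21 (fun l => l ++ [(-c.2.2, c.2.1, c.1)])
  let r := r.modify 22 (fun l => l ++ [(-c.2.2, c.1, -c.2.1)])
  let r := r.modify 23 (fun l => l ++ [(-c.2.2, -c.2.1, -c.1)])
  r

def rotateScanner (scanner : List (Int × Int × Int)) : List (List (Int × Int × Int)) :=
  scanner.foldl rotateStep (List.replicate 24 [])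

-- ===== PORT B =====
-- c[i] for i = 0,1,2 (indices in Source B are always reduced mod 3 before use)
def coordGet (c : Int × Int × Int) : Nat → Int
  | 0 => c.1
  | 1 => c.2.1
  | _ => c.2.2

def rotateScanner_alt (scanner : List (Int × Int × Int)) : List (List (Int × Int × Int)) :=
  (List.range 3).foldl (fun out a =>
    ([(1 : Int), -1]).foldl (fun out s =>
      let pts0 := scanner.map (fun c =>
        (s * coordGet c a, s * coordGet c ((a + 1) % 3), coordGet c ((a + 2) % 3)))
      ((List.range 4).foldl (fun st _ =>
          (st.1 ++ [st.2], st.2.map (fun t => (t.1, -s * t.2.2, s * t.2.1))))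
        (out, pts0)).1) out) []

-- ===== PRECONDITION & SPEC =====
def Spec_rotateScanner (scanner : List (Int × Int × Int)) (out : List (List (Int × Int × Int))) : Prop := out = rotateScanner_alt scanner
instance (scanner : List (Int × Int × Int)) (out : List (List (Int × Int × Int))) : Decidable (Spec_rotateScanner scanner out) := by unfold Spec_rotateScanner; infer_instance

-- ===== CLAIM (what is proved, stated in full; the proofs are below) =====
def Claim_equal_rotateScanner : Prop := ∀ (scanner : List (Int × Int × Int)), Dom_rotateScanner scanner → Spec_rotateScanner scanner (rotateScanner scanner)

-- ===== LEMMAS AND PROOFS =====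

-- Loop invariant for A: folding A's step over s starting from 24 explicit accumulators
-- appends to each accumulator the map of the corresponding orientation over s.
theorem rotateScanner_inv (s : List (Int × Int × Int))
    (l0 l1 l2 l3 l4 l5 l6 l7 l8 l9 l10 l11 l12 l13 l14 l15 l16 l17 l18 l19 l20 l21 l22 l23 :
      List (Int × Int × Int)) :
    s.foldl rotateStep
        [l0, l1, l2, l3, l4, l5, l6, l7, l8, l9, l10, l11, l12, l13, l14, l15, l16, l17, l18,
          l19, l20, l21, l22, l23] =
      [l0 ++ s.map (fun c => (c.1, c.2.1, c.2.2)),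
       l1 ++ s.map (fun c => (c.1, -c.2.2, c.2.1)),
       l2 ++ s.map (fun c => (c.1, -c.2.1, -c.2.2)),
       l3 ++ s.map (fun c => (c.1, c.2.2, -c.2.1)),
       l4 ++ s.map (fun c => (-c.1, -c.2.1, c.2.2)),
       l5 ++ s.map (fun c => (-c.1, c.2.2, c.2.1)),
       l6 ++ s.map (fun c => (-c.1, c.2.1, -c.2.2)),
       l7 ++ s.map (fun c => (-c.1, -c.2.2, -c.2.1)),
       l8 ++ s.map (fun c => (c.2.1, c.2.2, c.1)),
       l9 ++ s.map (fun c => (c.2.1, -c.1, c.2.2)),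
       l10 ++ s.map (fun c => (c.2.1, -c.2.2, -c.1)),
       l11 ++ s.map (fun c => (c.2.1, c.1, -c.2.2)),
       l12 ++ s.map (fun c => (-c.2.1, -c.2.2, c.1)),
       l13 ++ s.map (fun c => (-c.2.1, c.1, c.2.2)),
       l14 ++ s.map (fun c => (-c.2.1, c.2.2, -c.1)),
       l15 ++ s.map (fun c => (-c.2.1, -c.1, -c.2.2)),
       l16 ++ s.map (fun c => (c.2.2, c.1, c.2.1)),
       l17 ++ s.map (fun c => (c.2.2, -c.2.1, c.1)),
       l18 ++ s.map (fun c => (c.2.2, -c.1, -c.2.1)),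
       l19 ++ s.map (fun c => (c.2.2, c.2.1, -c.1)),
       l20 ++ s.map (fun c => (-c.2.2, -c.1, c.2.1)),
       l21 ++ s.map (fun c => (-c.2.2, c.2.1, c.1)),
       l22 ++ s.map (fun c => (-c.2.2, c.1, -c.2.1)),
       l23 ++ s.map (fun c => (-c.2.2, -c.2.1, -c.1))] := by
  induction s generalizing l0 l1 l2 l3 l4 l5 l6 l7 l8 l9 l10 l11 l12 l13 l14 l15 l16 l17 l18
      l19 l20 l21 l22 l23 with
  | nil => simp
  | cons c s ih =>
      rw [List.foldl_cons]
      show List.foldl rotateStep (rotateStep _ c) s = _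
      rw [show rotateStep
          [l0, l1, l2, l3, l4, l5, l6, l7, l8, l9, l10, l11, l12, l13, l14, l15, l16, l17,
            l18, l19, l20, l21, l22, l23] c =
          [l0 ++ [(c.1, c.2.1, c.2.2)], l1 ++ [(c.1, -c.2.2, c.2.1)],
           l2 ++ [(c.1, -c.2.1, -c.2.2)], l3 ++ [(c.1, c.2.2, -c.2.1)],
           l4 ++ [(-c.1, -c.2.1, c.2.2)], l5 ++ [(-c.1, c.2.2, c.2.1)],
           l6 ++ [(-c.1, c.2.1, -c.2.2)], l7 ++ [(-c.1, -c.2.2, -c.2.1)],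
           l8 ++ [(c.2.1, c.2.2, c.1)], l9 ++ [(c.2.1, -c.1, c.2.2)],
           l10 ++ [(c.2.1, -c.2.2, -c.1)], l11 ++ [(c.2.1, c.1, -c.2.2)],
           l12 ++ [(-c.2.1, -c.2.2, c.1)], l13 ++ [(-c.2.1, c.1, c.2.2)],
           l14 ++ [(-c.2.1, c.2.2, -c.1)], l15 ++ [(-c.2.1, -c.1, -c.2.2)],
           l16 ++ [(c.2.2, c.1, c.2.1)], l17 ++ [(c.2.2, -c.2.1, c.1)],
           l18 ++ [(c.2.2, -c.1, -c.2.1)], l19 ++ [(c.2.2, c.2.1, -c.1)],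
           l20 ++ [(-c.2.2, -c.1, c.2.1)], l21 ++ [(-c.2.2, c.2.1, c.1)],
           l22 ++ [(-c.2.2, c.1, -c.2.1)], l23 ++ [(-c.2.2, -c.2.1, -c.1)]] from rfl]
      rw [ih]
      simp

-- ===== VERDICT (by name: the statement is the Claim_ definition above) =====
theorem rotateScanner_spec : Claim_equal_rotateScanner := by
  intro scanner _
  unfold Spec_rotateScanner rotateScanner rotateScanner_alt
  rw [show (List.replicate 24 ([] : List (Int × Int × Int))) =
      [[], [], [], [], [], [], [], [], [], [], [], [], [], [], [], [], [], [], [], [], [], [],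
        [], []] from rfl]
  rw [rotateScanner_inv]
  simp [List.range_succ, coordGet, List.map_map, Function.comp]
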